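-- pv_equiv track=rewrite | github.com/Lt-kang/Coding_test | 프로그래머스/unrated/132267. 콜라 문제/콜라 문제.py | solution
-- ===== SOURCE A (Python) =====
-- def solution(a, b, n):
--     answer = 0
--     while True:
--         t = n%a
--         n = (n//a)*b
--         answer += n
--         n += t
--
--         if n < a: return answer
-- ===== SOURCE B (Python) =====
-- def solution(a, b, n):
--     if 1 <= b <= n:
--         # Steady state: every exchange spends a - b of the stock and
--         # yields b bottles, and trading is possible while at least b
--         # bottles would remain, so there are (n - b) // (a - b) exchanges.
--         return (n - b) // (a - b) * b
--     # Too few bottles (or no positive reward): only one trade-in happens.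
--     return n // a * b
-- ===== Notes on version B (the rewrite author's own statement) =====
-- stated objective: simpler
-- what changed: Replaced A's exchange-simulation loop by closed-form arithmetic: (n-b)//(a-b)*b in the steady regime 1 <= b <= n, and the single trade-in n//a*b otherwise; Pre_ excludes a <= 0 (a = 0 raises ZeroDivisionError, a < 0 is outside the cola problem's natural domain), b >= a with n >= a (A's loop diverges), and b < 1 with n < 0 (negative counts outside the natural domain).
-- outside the precondition, e.g. on solution(-5, 2, 7): A returns -4, B returns -2; on solution(5, -2, -100): A returns 24, B returns 40
import Mathlib
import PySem

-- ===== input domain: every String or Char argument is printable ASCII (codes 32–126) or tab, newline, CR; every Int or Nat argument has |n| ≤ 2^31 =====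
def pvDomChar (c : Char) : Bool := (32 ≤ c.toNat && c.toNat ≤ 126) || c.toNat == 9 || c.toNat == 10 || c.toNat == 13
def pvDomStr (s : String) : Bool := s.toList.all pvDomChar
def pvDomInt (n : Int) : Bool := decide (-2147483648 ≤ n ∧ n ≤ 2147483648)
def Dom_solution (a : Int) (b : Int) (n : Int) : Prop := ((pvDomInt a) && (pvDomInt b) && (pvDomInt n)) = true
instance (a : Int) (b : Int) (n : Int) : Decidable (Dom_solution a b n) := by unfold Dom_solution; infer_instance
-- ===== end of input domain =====

-- B replaces A's exchange-simulation loop by closed-form arithmetic (no loop).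


-- ===== PORT A =====
-- A's 'while True' loop; the fuel argument only makes it total (it is never
-- exhausted on Pre_-admitted inputs, where the loop terminates).
def solutionLoop (a : Int) (b : Int) : Nat → Int → Int → Int
  | 0, _, answer => answer
  | fuel + 1, n, answer =>
    let t := PySem.Int.mod n a
    let n1 := (PySem.Int.floordiv n a) * b
    let answer1 := answer + n1
    let n2 := n1 + t
    if n2 < a then answer1 else solutionLoop a b fuel n2 answer1

def solution (a : Int) (b : Int) (n : Int) : Int :=
  solutionLoop a b (n.toNat + 2) n 0

-- ===== PORT B =====
def solution_alt (a : Int) (b : Int) (n : Int) : Int :=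
  if 1 ≤ b ∧ b ≤ n then
    PySem.Int.floordiv (n - b) (a - b) * b
  else
    PySem.Int.floordiv n a * b

-- ===== PRECONDITION & SPEC =====
-- Pre_ excludes: a = 0 (A raises ZeroDivisionError), a < 0 (outside the cola
-- problem's natural domain, though A still returns accidental values there),
-- b ≥ a with n ≥ a (A's loop diverges), and b < 1 with n < 0 (negative counts
-- outside the natural domain, where A's totals are accidental).
def Pre_solution (a : Int) (b : Int) (n : Int) : Prop :=
  0 < a ∧ (b < a ∨ n < a) ∧ (1 ≤ b ∨ 0 ≤ n)
instance (a : Int) (b : Int) (n : Int) : Decidable (Pre_solution a b n) := by unfold Pre_solution; infer_instance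
def pvWitness_solution : Int × Int × Int := (3, 1, 20)

def Spec_solution (a : Int) (b : Int) (n : Int) (out : Int) : Prop := out = solution_alt a b n
instance (a : Int) (b : Int) (n : Int) (out : Int) : Decidable (Spec_solution a b n out) := by unfold Spec_solution; infer_instance

-- ===== CLAIM (what is proved, stated in full; the proofs are below) =====
def Claim_equal_solution : Prop := ∀ (a : Int) (b : Int) (n : Int), Dom_solution a b n → Pre_solution a b n → Spec_solution a b n (solution a b n)

-- ===== LEMMAS AND PROOFS =====

-- Steady-regime loop invariant: with 1 ≤ b < a and b ≤ n and enough fuel, the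
-- loop returns answer + (n-b)//(a-b)*b.
theorem solutionLoop_closed (a b : Int) (hb : 1 ≤ b) (hba : b < a) :
    ∀ fuel : Nat, ∀ n answer : Int, b ≤ n → n < b + fuel →
      solutionLoop a b fuel n answer = answer + PySem.Int.floordiv (n - b) (a - b) * b := by
  intro fuel
  induction fuel with
  | zero => intro n answer hbn hfuel; simp at hfuel; omega
  | succ fuel ih =>
    intro n answer hbn hfuel
    have ha : (0:Int) < a := by omega
    have hab : (0:Int) < a - b := by omega
    have hq : PySem.Int.floordiv n a = n / a := PySem.Int.floordiv_eq_ediv_of_pos ha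
    have ht : PySem.Int.mod n a = n % a := PySem.Int.mod_eq_emod_of_pos ha
    set q := n / a with hqdef
    set t := n % a with htdef
    have hqt : a * q + t = n := Int.mul_ediv_add_emod n a
    have ht0 : 0 ≤ t := Int.emod_nonneg n (by omega)
    have hta : t < a := Int.emod_lt_of_pos n ha
    have hn2 : q * b + t = n - q * (a - b) := by linear_combination hqt
    have hshift : (n - q * (a - b) - b) / (a - b) = (n - b) / (a - b) - q := by
      have := Int.add_mul_ediv_right (n - q * (a - b) - b) q (by omega : a - b ≠ 0)
      have he : n - q * (a - b) - b + q * (a - b) = n - b := by ring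
      rw [he] at this
      omega
    simp only [solutionLoop, hq, ht]
    by_cases hlt : q * b + t < a
    · rw [if_pos hlt]
      have hq0 : 0 ≤ q := Int.ediv_nonneg (by omega) (by omega)
      have hbn2 : b ≤ q * b + t := by
        rcases lt_or_ge n a with hna | hna
        · have hqz : q = 0 := Int.ediv_eq_zero_of_lt (by omega) hna
          rw [hqz] at hqt ⊢; simp at hqt ⊢; omega
        · have hq1 : 1 ≤ q := by
            have : a ≤ a * q + t := by omega
            nlinarith
          nlinarith
      have hz : (n - q * (a - b) - b) / (a - b) = 0 :=
        Int.ediv_eq_zero_of_lt (by omega) (by omega)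
      rw [hz] at hshift
      have : (n - b) / (a - b) = q := by omega
      rw [PySem.Int.floordiv_eq_ediv_of_pos hab, this]
    · rw [if_neg hlt]
      push Not at hlt
      have hq1 : 1 ≤ q := by
        by_contra hq1
        push Not at hq1
        have hq0 : q = 0 := le_antisymm (by omega) (Int.ediv_nonneg (by omega) (by omega))
        rw [hq0] at hlt; simp at hlt; omega
      have hdec : q * b + t < n := by nlinarith
      have := ih (q * b + t) (answer + q * b) (by omega) (by push_cast at hfuel ⊢; linarith)
      rw [this, hn2, PySem.Int.floordiv_eq_ediv_of_pos hab,
          PySem.Int.floordiv_eq_ediv_of_pos hab, hshift]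
      ring

-- Outside the steady regime (b < 1, or n < b) the Pre_-admitted inputs make
-- A's loop stop after its first iteration: the carried value q*b + t is < a.
theorem one_step_stop (a b n : Int) (ha : 0 < a)
    (hpre2 : b < a ∨ n < a) (hpre3 : 1 ≤ b ∨ 0 ≤ n)
    (h1 : ¬(1 ≤ b ∧ b ≤ n)) : (n / a) * b + n % a < a := by
  have ht0 : 0 ≤ n % a := Int.emod_nonneg n (by omega)
  have hta : n % a < a := Int.emod_lt_of_pos n ha
  rcases lt_or_ge b 1 with hb | hb
  · -- b ≤ 0, hence 0 ≤ n, so q ≥ 0 and q*b ≤ 0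
    have hn0 : 0 ≤ n := by rcases hpre3 with h | h; omega; exact h
    have hq0 : 0 ≤ n / a := Int.ediv_nonneg hn0 (by omega)
    have : (n / a) * b ≤ 0 := mul_nonpos_of_nonneg_of_nonpos hq0 (by omega)
    omega
  · -- 1 ≤ b, hence n < b
    have hnb : n < b := by
      by_contra h; exact h1 ⟨hb, by omega⟩
    rcases lt_or_ge n 0 with hn | hn
    · -- n < 0: q ≤ -1, so q*b ≤ -b
      have hq : n / a ≤ -1 := by
        by_contra h
        push Not at h
        have hq0 : 0 ≤ n / a := by omega
        nlinarith [Int.mul_ediv_add_emod n a]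
      have : (n / a) * b ≤ -b := by nlinarith
      omega
    · -- 0 ≤ n < a (from n < b and b < a, or directly n < a), so q = 0
      have hna : n < a := by
        rcases hpre2 with h | h
        · omega
        · exact h
      have hq0 : n / a = 0 := Int.ediv_eq_zero_of_lt hn hna
      rw [hq0]
      simp
      omega

-- ===== VERDICT (by name: the statement is the Claim_ definition above) =====
theorem solution_spec : Claim_equal_solution := by
  intro a b n _hdom hpre
  obtain ⟨ha, hpre2, hpre3⟩ := hpre
  unfold Spec_solution solution solution_alt
  by_cases h1 : 1 ≤ b ∧ b ≤ n
  · obtain ⟨hb, hbn⟩ := h1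
    have hba : b < a := by
      rcases hpre2 with h | h
      · exact h
      · omega
    rw [if_pos ⟨hb, hbn⟩]
    rw [solutionLoop_closed a b hb hba (n.toNat + 2) n 0 hbn
        (by have := Int.toNat_of_nonneg (show (0:Int) ≤ n by omega); push_cast; omega)]
    ring
  · rw [if_neg h1]
    have hq : PySem.Int.floordiv n a = n / a := PySem.Int.floordiv_eq_ediv_of_pos ha
    have ht : PySem.Int.mod n a = n % a := PySem.Int.mod_eq_emod_of_pos ha
    have hstop := one_step_stop a b n ha hpre2 hpre3 h1
    show solutionLoop a b (n.toNat + 1 + 1) n 0 = _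
    simp only [solutionLoop, hq, ht]
    rw [if_pos hstop]
    ring
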